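-- pv_equiv track=rewrite | github.com/pypi-data/pypi-mirror-400 | packages/uniseg/uniseg-0.10.1-py3-none-any.whl/uniseg/breaking.py | break_units
-- ===== SOURCE A (Python) =====
-- from collections.abc import Callable, Iterable, Iterator, Sequence
-- from typing import Any, Generic, Literal, Optional, TypeVar, Union
--
-- Breakables = Iterable[Literal[0, 1]]
--
-- def break_units(s: str, breakables: Breakables, /) -> Iterator[str]:
--     """Iterate every tokens of `s` basing on breakable table, `breakables`.
--
--     >>> list(break_units('ABC', [1, 1, 1])) == ['A', 'B', 'C']
--     True
--     >>> list(break_units('ABC', [1, 0, 1])) == ['AB', 'C']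
--     True
--     >>> list(break_units('ABC', [1, 0, 0])) == ['ABC']
--     True
--
--     The length of `s` must be equal to that of `breakables`.
--     """
--     i = 0
--     for j, bk in enumerate(breakables):
--         if bk:
--             if j:
--                 yield s[i:j]
--             i = j
--     if s:
--         yield s[i:]
-- ===== SOURCE B (Python) =====
-- def break_units(s, breakables, /):
--     """Reverse-scan version: walk the break table backwards, slicing each
--     segment from its known upper end, then emit the collected tokens reversed."""
--     bl = list(breakables)
--     out = []
--     hi = None  # upper end of the segment being closed; None = string tail
--     for j in range(len(bl) - 1, 0, -1):
--         if bl[j]: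
--             if hi is None:
--                 if s:
--                     out.append(s[j:])
--             else:
--                 out.append(s[j:hi])
--             hi = j
--     if hi is None:
--         if s:
--             out.append(s)
--     else:
--         out.append(s[:hi])
--     yield from reversed(out)
-- ===== Notes on version B (the rewrite author's own statement) =====
-- stated objective: alternative
-- what changed: B walks the break table backwards with a 'hi' upper-bound marker, slicing each segment from its upper end toward the previous break, collects tokens back-to-front and reverses them, instead of A's forward scan carrying the lower bound i.
import Mathlib
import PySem

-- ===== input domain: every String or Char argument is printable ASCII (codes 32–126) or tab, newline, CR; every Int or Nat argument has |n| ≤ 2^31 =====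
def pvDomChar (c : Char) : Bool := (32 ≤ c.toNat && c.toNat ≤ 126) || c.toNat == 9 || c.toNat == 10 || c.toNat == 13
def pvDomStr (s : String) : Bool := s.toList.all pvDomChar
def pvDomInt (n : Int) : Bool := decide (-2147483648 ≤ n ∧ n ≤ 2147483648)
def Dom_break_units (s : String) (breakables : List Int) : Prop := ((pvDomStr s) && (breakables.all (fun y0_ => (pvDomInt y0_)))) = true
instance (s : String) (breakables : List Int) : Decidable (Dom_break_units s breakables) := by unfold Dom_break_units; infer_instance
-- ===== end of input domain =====

-- B scans the break table BACKWARDS, slicing each segment from its known upper end, and emits the collected tokens reversed; same cost, opposite traversal order.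

-- ===== PORT A =====
-- loop body of A's fused forward scan: 'if bk: (if j: yield s[i:j]); i = j' on state (tokens, i)
def pvStepA (s : String) (p : List String × Int) (jb : Int × Int) : List String × Int :=
  if jb.2 ≠ 0 then
    ((if jb.1 ≠ 0 then p.1 ++ [PySem.Str.slice s (some p.2) (some jb.1)] else p.1), jb.1)
  else p

def break_units (s : String) (breakables : List Int) : List String :=
  let st := (PySem.List.enumerate breakables 0).foldl (pvStepA s) ([], 0)
  if s ≠ "" then st.1 ++ [PySem.Str.slice s (some st.2) none] else st.1

-- ===== PORT B =====
-- loop body of B's backward scan: 'if bl[j]: out.append(s[j:] if hi is None and s else s[j:hi]); hi = j'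
-- on state (out, hi); hi = none encodes Python's None (the string tail is still open)
def pvStepB (s : String) (bl : List Int) (st : List String × Option Int) (j : Int) : List String × Option Int :=
  if PySem.List.pyGetD bl j 0 ≠ 0 then
    match st.2 with
    | none => ((if s ≠ "" then st.1 ++ [PySem.Str.slice s (some j) none] else st.1), some j)
    | some hi => (st.1 ++ [PySem.Str.slice s (some j) (some hi)], some j)
  else st

def break_units_alt (s : String) (breakables : List Int) : List String :=
  let st := (PySem.List.pyRange ((breakables.length : Int) - 1) 0 (-1)).foldl (pvStepB s breakables) ([], none)
  let out := match st.2 with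
    | none => if s ≠ "" then st.1 ++ [s] else st.1
    | some hi => st.1 ++ [PySem.Str.slice s none (some hi)]
  out.reverse

-- ===== PRECONDITION & SPEC =====
def Spec_break_units (s : String) (breakables : List Int) (out : List String) : Prop := out = break_units_alt s breakables
instance (s : String) (breakables : List Int) (out : List String) : Decidable (Spec_break_units s breakables out) := by unfold Spec_break_units; infer_instance

-- ===== CLAIM (what is proved, stated in full; the proofs are below) =====
def Claim_equal_break_units : Prop := ∀ (s : String) (breakables : List Int), Dom_break_units s breakables → Spec_break_units s breakables (break_units s breakables)

-- ===== LEMMAS AND PROOFS =====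

-- the segment list both programs produce, as a function of the ascending break positions J
def pvSegs (s : String) : Int → List Int → List String
  | prev, [] => if s ≠ "" then [PySem.Str.slice s (some prev) none] else []
  | prev, j :: rest => PySem.Str.slice s (some prev) (some j) :: pvSegs s j rest

-- ascending positions m, m+1, … of the nonzero entries of a flag list
def pvBreakIdx : List Int → Int → List Int
  | [], _ => []
  | b :: rest, m => if b ≠ 0 then m :: pvBreakIdx rest (m + 1) else pvBreakIdx rest (m + 1)

-- A's epilogue applied to a loop state
def pvFinishA (s : String) (st : List String × Int) : List String :=
  if s ≠ "" then st.1 ++ [PySem.Str.slice s (some st.2) none] else st.1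

-- B's active step (the branch taken when bl[j] is truthy)
def pvAct (s : String) (st : List String × Option Int) (j : Int) : List String × Option Int :=
  match st.2 with
  | none => ((if s ≠ "" then st.1 ++ [PySem.Str.slice s (some j) none] else st.1), some j)
  | some hi => (st.1 ++ [PySem.Str.slice s (some j) (some hi)], some j)

theorem pv_slice_zero_none (s : String) : PySem.Str.slice s (some 0) none = s := by
  simp [PySem.Str.slice]

theorem pv_slice_zero_some (s : String) (j : Int) :
    PySem.Str.slice s (some 0) (some j) = PySem.Str.slice s none (some j) := by
  simp [PySem.Str.slice]

-- ascending positions m, m+1, … of the nonzero entries of bl.drop m, via lookups into bl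
theorem pv_filter_range (bl : List Int) :
    ∀ (xs : List Int) (m : Nat), xs = bl.drop m →
      (PySem.List.pyRange (m : Int) ((m : Int) + xs.length) 1).filter
          (fun j => decide (PySem.List.pyGetD bl j 0 ≠ 0))
        = pvBreakIdx xs m := by
  intro xs
  induction xs with
  | nil => intro m _; simp [PySem.List.pyRange_one_eq_nil, pvBreakIdx]
  | cons x rest ih =>
      intro m h
      have hget : bl[m]? = some x := by
        have h0 : (bl.drop m)[0]? = some x := by rw [← h]; simp
        simpa using h0
      have hx : PySem.List.pyGetD bl (m : Int) 0 = x := by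
        rw [PySem.List.pyGetD_of_nonneg]
        · simp [hget]
        · positivity
      have hrest : rest = bl.drop (m + 1) := by
        have := congrArg List.tail h
        simpa [List.tail_drop] using this
      have hcast2 : (m : Int) + 1 = ((m + 1 : Nat) : Int) := by push_cast; ring
      have hcast : (m : Int) + ((x :: rest).length : Int) = ((m + 1 : Nat) : Int) + (rest.length : Int) := by
        push_cast [List.length_cons]; ring
      rw [PySem.List.pyRange_one_cons (by push_cast [List.length_cons]; omega), List.filter_cons,
        hcast, hcast2, ih (m + 1) hrest]
      simp only [pvBreakIdx, hcast2, hx]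
      by_cases hx0 : x = 0 <;> simp [hx0]

-- A-side characterisation: the fused scan plus epilogue yields pvSegs over the break positions
theorem pv_A_char (s : String) :
    ∀ (xs : List Int) (m : Int) (acc : List String) (prev : Int), 1 ≤ m →
      pvFinishA s ((PySem.List.enumerate xs m).foldl (pvStepA s) (acc, prev))
        = acc ++ pvSegs s prev (pvBreakIdx xs m) := by
  intro xs
  induction xs with
  | nil =>
      intro m acc prev hm
      simp [PySem.List.enumerate_nil, pvFinishA, pvBreakIdx, pvSegs]
      split_ifs <;> simp
  | cons b rest ih =>
      intro m acc prev hm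
      rw [PySem.List.enumerate_cons, List.foldl_cons]
      by_cases hb : b ≠ 0
      · have hm0 : m ≠ 0 := by omega
        simp only [pvStepA]
        rw [if_pos hb, if_pos hm0, ih (m + 1) _ m (by omega)]
        simp [pvBreakIdx, hb, pvSegs]
      · simp only [pvStepA]
        rw [if_neg hb, ih (m + 1) acc prev (by omega)]
        simp [pvBreakIdx, hb]

-- B-side: the backward fold over a reversed ascending break list builds pvSegs reversed
theorem pv_B_fold (s : String) :
    ∀ (J : List Int) (j : Int),
      (List.reverse (j :: J)).foldl (pvAct s) ([], none)
        = ((pvSegs s j J).reverse, some j) := by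
  intro J
  induction J with
  | nil => intro j; simp [pvAct, pvSegs]; split_ifs <;> simp
  | cons j2 rest ih =>
      intro j
      have : List.reverse (j :: j2 :: rest) = List.reverse (j2 :: rest) ++ [j] := by simp
      rw [this, List.foldl_append, ih j2]
      simp [pvAct, pvSegs]

-- ===== VERDICT (by name: the statement is the Claim_ definition above) =====
-- A equals the common segment model
theorem pv_A_model (s : String) (bl : List Int) :
    break_units s bl = pvSegs s 0 (pvBreakIdx (bl.drop 1) 1) := by
  cases bl with
  | nil => simp [break_units, PySem.List.enumerate_nil, pvSegs, pvBreakIdx]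
  | cons b tl =>
      show pvFinishA s ((PySem.List.enumerate (b :: tl) 0).foldl (pvStepA s) ([], 0))
        = pvSegs s 0 (pvBreakIdx ((b :: tl).drop 1) 1)
      rw [PySem.List.enumerate_cons, List.foldl_cons]
      have h0 : pvStepA s ([], 0) (0, b) = ([], 0) := by
        by_cases hb : b ≠ 0 <;> simp [pvStepA, hb]
      rw [h0, show (0 : Int) + 1 = 1 from by norm_num, pv_A_char s tl 1 [] 0 le_rfl]
      simp

-- B equals the common segment model
theorem pv_B_model (s : String) (bl : List Int) :
    break_units_alt s bl = pvSegs s 0 (pvBreakIdx (bl.drop 1) 1) := by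
  have hstep : ∀ (l : List Int) (init : List String × Option Int),
      l.foldl (pvStepB s bl) init
        = (l.filter (fun j => decide (PySem.List.pyGetD bl j 0 ≠ 0))).foldl (pvAct s) init := by
    intro l init
    exact PySem.List.foldl_ite_eq_foldl_filter (fun j => PySem.List.pyGetD bl j 0 ≠ 0) (pvAct s) l init
  have hrange : (PySem.List.pyRange ((bl.length : Int) - 1) 0 (-1)).filter
        (fun j => decide (PySem.List.pyGetD bl j 0 ≠ 0))
      = (pvBreakIdx (bl.drop 1) 1).reverse := by
    rw [PySem.List.pyRange_neg_one_eq_reverse, List.filter_reverse]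
    congr 1
    cases bl with
    | nil => simp [PySem.List.pyRange_one_eq_nil, pvBreakIdx]
    | cons b tl =>
        have h1 : ((0 : Int) + 1) = ((1 : Nat) : Int) := by norm_num
        have h2 : ((b :: tl).length : Int) - 1 + 1 = ((1 : Nat) : Int) + (tl.length : Int) := by
          push_cast [List.length_cons]; ring
        rw [h1, h2, pv_filter_range (b :: tl) tl 1 (by simp)]
        simp
  show (match ((PySem.List.pyRange ((bl.length : Int) - 1) 0 (-1)).foldl (pvStepB s bl) ([], none)).2 with
        | none => if s ≠ "" then ((PySem.List.pyRange ((bl.length : Int) - 1) 0 (-1)).foldl (pvStepB s bl) ([], none)).1 ++ [s]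
                  else ((PySem.List.pyRange ((bl.length : Int) - 1) 0 (-1)).foldl (pvStepB s bl) ([], none)).1
        | some hi => ((PySem.List.pyRange ((bl.length : Int) - 1) 0 (-1)).foldl (pvStepB s bl) ([], none)).1
                      ++ [PySem.Str.slice s none (some hi)]).reverse
      = pvSegs s 0 (pvBreakIdx (bl.drop 1) 1)
  rw [hstep, hrange]
  cases hJ : pvBreakIdx (bl.drop 1) 1 with
  | nil =>
      simp only [List.reverse_nil, List.foldl_nil, pvSegs]
      by_cases hs : s = "" <;> simp [hs, pv_slice_zero_none]
  | cons j J =>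
      rw [pv_B_fold s J j]
      simp [pvSegs, pv_slice_zero_some]

-- ===== VERDICT (by name: the statement is the Claim_ definition above) =====
theorem break_units_spec : Claim_equal_break_units := by
  intro s bl _
  unfold Spec_break_units
  rw [pv_A_model, pv_B_model]
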